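-- pv_equiv track=rewrite | github.com/Eunyeol-Lucas/algorithm | 프로그래머스/skict/pro1.py | solution
-- ===== SOURCE A (Python) =====
-- def solution(goods):
--     answer = [[] for _ in range(len(goods))]
--     max_len = 0
--     for i in goods:
--         max_len = max(max_len, len(i))
--     for i in range(1, max_len+1):
--         n_tmp = []
--         for j in range(len(goods)):
--             if answer[j] == [] and len(goods[j]) >= i:
--                 for k in range(0, len(goods[j])+1-i):
--                     alp = goods[j][k:k+i]
--                     flag = 0
--                     for o in range(len(goods)):
--                         if o != j:
--                             if goods[o].find(alp) != -1 and alp not in n_tmp: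
--                                 flag = 1
--                                 n_tmp.append(alp)
--                                 break
--                     if flag == 0 and alp not in answer[j] and alp not in n_tmp:
--                         answer[j].append(alp)
--
--     for i in range(len(goods)):
--         answer[i].sort()
--         if answer[i] != []:
--             tmp = " ".join(answer[i])
--         else:
--             tmp = "None"
--         answer[i] = tmp
--
--     return answer
-- ===== SOURCE B (Python) =====
-- def solution(goods):
--     n = len(goods)
--     res = [None] * n
--     max_len = max((len(g) for g in goods), default=0)
--     for i in range(1, max_len + 1):
--         # owner[s] = the unique index whose string contains s, or -1 if several do
--         owner = {}
--         for j, g in enumerate(goods):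
--             for k in range(len(g) - i + 1):
--                 s = g[k:k + i]
--                 if owner.setdefault(s, j) != j:
--                     owner[s] = -1
--         for j in range(n):
--             if res[j] is None:
--                 uniq = sorted(s for s, o in owner.items() if o == j)
--                 if uniq:
--                     res[j] = " ".join(uniq)
--     return [r if r is not None else "None" for r in res]
-- ===== Notes on version B (the rewrite author's own statement) =====
-- stated objective: faster
-- what changed: Instead of scanning every other string with find() for each candidate substring, B builds one dictionary per substring length mapping each substring to the unique index of the string containing it (or -1 if several contain it), so each string's unique substrings are read off the dictionary in a single pass.
import Mathlib
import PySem

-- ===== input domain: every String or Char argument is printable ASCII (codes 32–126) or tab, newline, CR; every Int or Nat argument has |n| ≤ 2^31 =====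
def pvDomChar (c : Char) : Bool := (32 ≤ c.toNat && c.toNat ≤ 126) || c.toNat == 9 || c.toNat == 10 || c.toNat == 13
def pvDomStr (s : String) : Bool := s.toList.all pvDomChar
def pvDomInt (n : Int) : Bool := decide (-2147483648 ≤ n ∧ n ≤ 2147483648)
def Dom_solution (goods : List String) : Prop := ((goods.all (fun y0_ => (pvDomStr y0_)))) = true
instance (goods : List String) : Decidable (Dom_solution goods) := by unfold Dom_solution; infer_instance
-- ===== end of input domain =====

-- B replaces A's per-substring scan over all other strings by one per-length dictionary
-- mapping each substring to its unique containing string (or -1): an asymptotically faster pass.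

-- ===== PORT A =====
-- the o-loop ('for o in range(len(goods)): …  break'), returning (flag, n_tmp)
def solOLoop (goods : List String) (j : Int) (alp : String) :
    List Int → List String → Int × List String
  | [], nt => (0, nt)
  | o :: rest, nt =>
    if o ≠ j then
      if PySem.Str.find (PySem.List.pyGetD goods o "") alp ≠ -1 ∧ alp ∉ nt then
        (1, nt ++ [alp])
      else solOLoop goods j alp rest nt
    else solOLoop goods j alp rest nt

-- the k-loop over range(0, len(goods[j])+1-i); state = (answer, n_tmp);
-- answer[j].append(…) is List.set at the in-range index j (j comes from range(len(goods)))
def solKLoop (goods : List String) (i j : Int) :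
    List Int → List (List String) × List String → List (List String) × List String
  | [], st => st
  | k :: rest, (ans, nt) =>
    let alp := PySem.Str.slice (PySem.List.pyGetD goods j "") (some k) (some (k + i))
    let fnt := solOLoop goods j alp (PySem.List.pyRange 0 (goods.length : Int) 1) nt
    let ans' := if fnt.1 = 0 ∧ alp ∉ PySem.List.pyGetD ans j [] ∧ alp ∉ fnt.2 then
        ans.set j.toNat (PySem.List.pyGetD ans j [] ++ [alp])
      else ans
    solKLoop goods i j rest (ans', fnt.2)

-- the j-loop ('for j in range(len(goods))')
def solJLoop (goods : List String) (i : Int) :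
    List Int → List (List String) × List String → List (List String) × List String
  | [], st => st
  | j :: rest, (ans, nt) =>
    let st' :=
      if PySem.List.pyGetD ans j [] = [] ∧ PySem.Str.len (PySem.List.pyGetD goods j "") ≥ i then
        solKLoop goods i j
          (PySem.List.pyRange 0 (PySem.Str.len (PySem.List.pyGetD goods j "") + 1 - i) 1) (ans, nt)
      else (ans, nt)
    solJLoop goods i rest st'

-- the i-loop ('for i in range(1, max_len+1)'); n_tmp = [] at the top of each iteration
def solILoop (goods : List String) : List Int → List (List String) → List (List String)
  | [], ans => ans
  | i :: rest, ans => solILoop goods rest (solJLoop goods i (PySem.List.pyRange 0 (goods.length : Int) 1) (ans, [])).1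

def solution (goods : List String) : List String :=
  let answer : List (List String) :=
    (PySem.List.pyRange 0 (goods.length : Int) 1).map (fun _ => ([] : List String))
  let maxLen : Int := goods.foldl (fun m g => max m (PySem.Str.len g)) 0
  let answer := solILoop goods (PySem.List.pyRange 1 (maxLen + 1) 1) answer
  -- final loop: sort each answer[i], join with " " (or "None")
  answer.map (fun l =>
    let l := PySem.List.sorted l (fun x => x) false
    if l ≠ [] then PySem.Str.join " " l else "None")

-- ===== PORT B =====
-- inner loop of Source B over the substrings of one string g (index j):
-- 'if owner.setdefault(s, j) != j: owner[s] = -1' (the setdefault return value is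
-- the stored value if present else j, read off before updating the dict)
def altOwnerStr (i : Int) (j : Int) (g : String)
    (d : PySem.Dict String Int) : PySem.Dict String Int :=
  (PySem.List.pyRange 0 (PySem.Str.len g - i + 1) 1).foldl (fun d k =>
    let s := PySem.Str.slice g (some k) (some (k + i))
    let v := (d.get? s).getD j
    let d := d.setdefault s j
    if v ≠ j then d.insert s (-1) else d) d

-- 'owner = {}; for j, g in enumerate(goods): …'
def altOwner (goods : List String) (i : Int) : PySem.Dict String Int :=
  (PySem.List.enumerate goods 0).foldl (fun d p => altOwnerStr i p.1 p.2 d)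
    PySem.Dict.empty

-- 'for j in range(n): if res[j] is None: …'
def altAssign (owner : PySem.Dict String Int) :
    List Int → List (Option String) → List (Option String)
  | [], res => res
  | j :: rest, res =>
    let res' :=
      if PySem.List.pyGetD res j none = none then
        let uniq := PySem.List.sorted ((owner.items.filter (fun p => p.2 == j)).map (·.1))
          (fun x => x) false
        if uniq ≠ [] then res.set j.toNat (some (PySem.Str.join " " uniq)) else res
      else res
    altAssign owner rest res'

def solution_alt (goods : List String) : List String :=
  let n : Int := (goods.length : Int)
  let maxLen : Int := PySem.List.maxD (goods.map PySem.Str.len) (fun x => x) 0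
  let res : List (Option String) := (PySem.List.pyRange 0 n 1).map (fun _ => (none : Option String))
  let res := (PySem.List.pyRange 1 (maxLen + 1) 1).foldl (fun res i =>
      altAssign (altOwner goods i) (PySem.List.pyRange 0 n 1) res) res
  res.map (fun r => r.getD "None")

-- ===== PRECONDITION & SPEC =====
def Spec_solution (goods : List String) (out : List String) : Prop := out = solution_alt goods
instance (goods : List String) (out : List String) : Decidable (Spec_solution goods out) := by unfold Spec_solution; infer_instance

-- ===== CLAIM (what is proved, stated in full; the proofs are below) =====
def Claim_equal_solution : Prop := ∀ (goods : List String), Dom_solution goods → Spec_solution goods (solution goods)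

-- ===== LEMMAS AND PROOFS =====

-- ---------- proof-side vocabulary ----------

-- the character list of goods[o]
def gAt (goods : List String) (o : Nat) : List Char := (goods.getD o "").toList

-- all substrings of g of length i, in order of occurrence (with repetitions)
def subsOf (g : List Char) (i : Nat) : List String :=
  (List.range (g.length + 1 - i)).map (fun k => String.ofList ((g.drop k).take i))

-- s occurs in no string other than goods[j]
def uniqB (goods : List String) (j : Nat) (s : String) : Bool :=
  (List.range goods.length).all
    (fun o => decide (o = j) || !(PySem.Chars.isIn s.toList (gAt goods o)))

-- append elements not already present (first-occurrence dedup, A's 'not in' appends)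
def dExt (a : List String) (l : List String) : List String :=
  l.foldl (fun a x => if x ∈ a then a else a ++ [x]) a

-- the distinct length-i substrings of goods[j] occurring in no other string
def U (goods : List String) (j i : Nat) : List String :=
  dExt [] ((subsOf (gAt goods j) i).filter (uniqB goods j))

-- answer[j] of A after the lengths 1..m have been processed
def firstU (goods : List String) (j : Nat) : Nat → List String
  | 0 => []
  | m+1 => if firstU goods j m = [] then U goods j (m+1) else firstU goods j m

-- res[j] of B after the lengths 1..m have been processed
def optA (goods : List String) (j m : Nat) : Option String :=
  if firstU goods j m = [] then none
  else some (PySem.Str.join " " (PySem.List.sorted (firstU goods j m) (fun x => x) false))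

-- invariant of n_tmp: every element occurs in two distinct strings
def shared2 (goods : List String) (s : String) : Prop :=
  ∃ p q, p < goods.length ∧ q < goods.length ∧ p ≠ q ∧
    s.toList <:+: gAt goods p ∧ s.toList <:+: gAt goods q

-- the body of A's k-loop as a fold step over the substring alp
def kStep (goods : List String) (j : Int) :
    List (List String) × List String → String → List (List String) × List String :=
  fun st alp =>
    let fnt := solOLoop goods j alp (PySem.List.pyRange 0 (goods.length : Int) 1) st.2
    let ans' := if fnt.1 = 0 ∧ alp ∉ PySem.List.pyGetD st.1 j [] ∧ alp ∉ fnt.2 then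
        st.1.set j.toNat (PySem.List.pyGetD st.1 j [] ++ [alp])
      else st.1
    (ans', fnt.2)

-- occurrence value stored by B's dictionary
def f1 (j : Int) : Option Int → Option Int
  | none => some j
  | some v => if v = j then some j else some (-1)

def occursIn (goods : List String) (i : Nat) (s : String) (m : Nat) : List Nat :=
  (List.range m).filter (fun o => decide (s ∈ subsOf (gAt goods o) i))

def ownerVal (goods : List String) (i : Nat) (s : String) (m : Nat) : Option Int :=
  match occursIn goods i s m with
  | [] => none
  | [j] => some (j : Int)
  | _ => some (-1)

-- B's per-index assignment value at length i
def bVal (owner : PySem.Dict String Int) (j : Int) : Option String :=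
  let uniq := PySem.List.sorted ((owner.items.filter (fun p => p.2 == j)).map (·.1))
    (fun x => x) false
  if uniq ≠ [] then some (PySem.Str.join " " uniq) else none

-- ---------- generic list helpers ----------

theorem setMap {α : Type} (g : Nat → α) (N m : Nat) (v : α) (hm : m < N) :
    ((List.range N).map g).set m v
      = (List.range N).map (fun j => if j = m then v else g j) := by
  apply List.ext_getElem (by simp)
  intro i h1 h2
  simp only [List.length_map, List.length_range] at h1 h2
  simp only [List.getElem_set, List.getElem_map, List.getElem_range]
  rcases eq_or_ne m i with h | h
  · subst h; simp
  · simp [h, Ne.symm h]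


theorem pyGetDMap {α : Type} (g : Nat → α) (N m : Nat) (d : α) (hm : m < N) :
    PySem.List.pyGetD ((List.range N).map g) (m : Int) d = g m := by
  rw [PySem.List.pyGetD_natCast]
  simp [List.getD_eq_getElem?_getD, List.getElem?_map, List.getElem?_range, hm]


theorem pyGetD_set_self {α : Type} (l : List α) (n : Nat) (v d : α) (h : n < l.length) :
    PySem.List.pyGetD (l.set n v) (n : Int) d = v := by
  rw [PySem.List.pyGetD_natCast]
  simp [List.getD_eq_getElem?_getD, List.getElem?_set_self, h]


theorem set_getD_self {α : Type} (l : List α) (n : Nat) (v d : α) (h : n < l.length)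
    (hv : l.getD n d = v) : l.set n v = l := by
  subst hv
  apply List.ext_getElem (by simp)
  intro i h1 h2
  simp only [List.getElem_set]
  split
  · next heq => subst heq; simp [List.getD_eq_getElem?_getD, List.getElem?_eq_getElem h2]
  · rfl


theorem mem_dExt (a l : List String) (x : String) :
    x ∈ dExt a l ↔ x ∈ a ∨ x ∈ l := by
  induction l generalizing a with
  | nil => simp [dExt]
  | cons y l ih =>
    show x ∈ dExt (if y ∈ a then a else a ++ [y]) l ↔ _
    rw [ih]
    by_cases hy : y ∈ a <;> simp [hy]
    · constructor
      · rintro (h | h)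
        · exact Or.inl h
        · exact Or.inr (Or.inr h)
      · rintro (h | h | h)
        · exact Or.inl h
        · subst h; exact Or.inl hy
        · exact Or.inr h
    · tauto


theorem nodup_dExt (a l : List String) (h : a.Nodup) : (dExt a l).Nodup := by
  induction l generalizing a with
  | nil => exact h
  | cons y l ih =>
    show (dExt (if y ∈ a then a else a ++ [y]) l).Nodup
    apply ih
    by_cases hy : y ∈ a <;> simp [hy, h]
    simp only [List.Nodup, List.pairwise_append]
    refine ⟨h, by simp, ?_⟩
    intro z hz w hw; simp at hw; subst hw
    intro hzy; subst hzy; exact hy hz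


theorem filter_range_eq_singleton_iff (n j : Nat) (p : Nat → Bool) :
    (List.range n).filter p = [j] ↔ j < n ∧ p j = true ∧ ∀ o < n, o ≠ j → p o = false := by
  constructor
  · intro h
    have hj : j ∈ (List.range n).filter p := by rw [h]; simp
    simp only [List.mem_filter, List.mem_range] at hj
    refine ⟨hj.1, hj.2, fun o ho hne => ?_⟩
    by_contra hp
    have : o ∈ (List.range n).filter p := by
      simp [List.mem_filter, List.mem_range, ho, eq_true_of_ne_false hp]
    rw [h] at this; simp at this; exact hne this
  · rintro ⟨hjn, hpj, hothers⟩
    induction n with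
    | zero => omega
    | succ n ih =>
      rw [List.range_succ, List.filter_append]
      rcases Nat.lt_or_ge j n with h | h
      · rw [ih h (fun o ho => hothers o (by omega))]
        have : p n = false := hothers n (by omega) (by omega)
        simp [this]
      · have hj : j = n := by omega
        subst hj
        have : (List.range j).filter p = [] := by
          rw [List.filter_eq_nil_iff]
          intro o ho; simp at ho
          simp [hothers o (by omega) (by omega)]
        simp [this, hpj]


-- ---------- substrings ----------

theorem mem_subsOf (g : List Char) (i : Nat) (hi : 1 ≤ i) (s : String) :
    s ∈ subsOf g i ↔ s.toList.length = i ∧ s.toList <:+: g := by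
  unfold subsOf
  simp only [List.mem_map, List.mem_range]
  constructor
  · rintro ⟨k, hk, rfl⟩
    have hle : k + i ≤ g.length := by omega
    have hlen : ((g.drop k).take i).length = i := by
      simp [List.length_take, List.length_drop]; omega
    refine ⟨by simp [hlen], ?_⟩
    rw [List.infix_iff_prefix_suffix]
    exact ⟨g.drop k, by simp [List.take_prefix], List.drop_suffix k g⟩
  · rintro ⟨hlen, hinf⟩
    have := (PySem.Chars.exists_prefix_drop_iff_isIn s.toList g).2
      ((PySem.Chars.isIn_iff_infix _ _).2 hinf)
    obtain ⟨k, hpre⟩ := this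
    have hlek : s.toList.length ≤ (g.drop k).length := hpre.length_le
    simp only [List.length_drop] at hlek
    refine ⟨k, by omega, ?_⟩
    have := List.prefix_iff_eq_take.1 hpre
    rw [hlen] at this
    rw [← this]
    simp


theorem sliceMap (g : String) (i : Nat) :
    (PySem.List.pyRange 0 (PySem.Str.len g + 1 - (i : Int)) 1).map
        (fun k => PySem.Str.slice g (some k) (some (k + (i : Int))))
      = subsOf g.toList i := by
  have hb : (PySem.Str.len g + 1 - (i : Int)) - 0 = ((g.toList.length + 1 : Int) - i) := by
    simp [PySem.Str.len_eq]
  rw [PySem.List.pyRange_one]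
  have hbn : ((PySem.Str.len g + 1 - (i : Int)) - 0).toNat = g.toList.length + 1 - i := by
    rw [hb]; omega
  rw [hbn]
  unfold subsOf
  apply List.ext_getElem (by simp)
  intro k h1 h2
  simp only [List.getElem_map, List.getElem_range, zero_add]
  have h3 : PySem.List.slice g.toList (some ((k : Int))) (some ((k : Int) + (i : Int)))
      = (g.toList.drop k).take i := PySem.List.slice_natCast_add g.toList k i
  have h4 : (PySem.Str.slice g (some ((k : Int))) (some ((k : Int) + (i : Int)))).toList
      = PySem.List.slice g.toList (some ((k : Int))) (some ((k : Int) + (i : Int))) := by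
    rw [PySem.Str.toList_slice]; simp
  rw [← h3, ← h4]
  exact (String.ofList_eq.mpr rfl).symm


theorem uniqB_iff (goods : List String) (j : Nat) (s : String) :
    uniqB goods j s = true ↔ ∀ o < goods.length, o ≠ j → ¬ s.toList <:+: gAt goods o := by
  unfold uniqB
  simp only [List.all_eq_true, List.mem_range, Bool.or_eq_true, decide_eq_true_eq,
    Bool.not_eq_true', PySem.Chars.isIn_eq_false_iff]
  constructor
  · intro h o ho hne
    rcases h o ho with h1 | h1
    · exact absurd h1 hne
    · exact h1
  · intro h o ho
    by_cases hoj : o = j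
    · exact Or.inl hoj
    · exact Or.inr (h o ho hoj)


theorem shared2_other (goods : List String) (s : String) (h : shared2 goods s) (j : Nat) :
    ∃ o < goods.length, o ≠ j ∧ s.toList <:+: gAt goods o := by
  obtain ⟨p, q, hp, hq, hpq, hsp, hsq⟩ := h
  by_cases hjp : p = j
  · exact ⟨q, hq, by omega, hsq⟩
  · exact ⟨p, hp, hjp, hsp⟩


-- ---------- A: the o-loop ----------

theorem oLoop_spec (goods : List String) (j : Int) (alp : String) (os : List Int)
    (nt : List String) :
    solOLoop goods j alp os nt =
      if alp ∉ nt ∧ ∃ o ∈ os, o ≠ j ∧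
          PySem.Str.find (PySem.List.pyGetD goods o "") alp ≠ -1 then
        (1, nt ++ [alp])
      else (0, nt) := by
  induction os generalizing nt with
  | nil => simp [solOLoop]
  | cons o os ih =>
    by_cases ho : o = j
    · have : solOLoop goods j alp (o :: os) nt = solOLoop goods j alp os nt := by
        simp [solOLoop, ho]
      rw [this, ih]
      have hcond : (alp ∉ nt ∧ ∃ x ∈ o :: os, x ≠ j ∧
            PySem.Str.find (PySem.List.pyGetD goods x "") alp ≠ -1)
          ↔ (alp ∉ nt ∧ ∃ x ∈ os, x ≠ j ∧
            PySem.Str.find (PySem.List.pyGetD goods x "") alp ≠ -1) := by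
        simp [ho]
      rw [if_congr hcond rfl rfl]
    · by_cases hf : PySem.Str.find (PySem.List.pyGetD goods o "") alp ≠ -1 ∧ alp ∉ nt
      · have : solOLoop goods j alp (o :: os) nt = (1, nt ++ [alp]) := by
          simp only [solOLoop]
          rw [if_pos ho, if_pos hf]
        rw [this, if_pos ⟨hf.2, o, List.mem_cons_self, ho, hf.1⟩]
      · have : solOLoop goods j alp (o :: os) nt = solOLoop goods j alp os nt := by
          simp only [solOLoop]
          rw [if_pos ho, if_neg hf]
        rw [this, ih]
        have hcond : (alp ∉ nt ∧ ∃ x ∈ o :: os, x ≠ j ∧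
              PySem.Str.find (PySem.List.pyGetD goods x "") alp ≠ -1)
            ↔ (alp ∉ nt ∧ ∃ x ∈ os, x ≠ j ∧
              PySem.Str.find (PySem.List.pyGetD goods x "") alp ≠ -1) := by
          constructor
          · rintro ⟨hnt, x, hx, hxj, hfx⟩
            rcases List.mem_cons.1 hx with rfl | hx
            · exact absurd ⟨hfx, hnt⟩ hf
            · exact ⟨hnt, x, hx, hxj, hfx⟩
          · rintro ⟨hnt, x, hx, hxj, hfx⟩
            exact ⟨hnt, x, List.mem_cons_of_mem _ hx, hxj, hfx⟩
        rw [if_congr hcond rfl rfl]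


theorem oLoop_range (goods : List String) (jn : Nat) (alp : String) (nt : List String) :
    solOLoop goods (jn : Int) alp (PySem.List.pyRange 0 (goods.length : Int) 1) nt =
      if alp ∉ nt ∧ ∃ o < goods.length, o ≠ jn ∧ alp.toList <:+: gAt goods o then
        (1, nt ++ [alp])
      else (0, nt) := by
  rw [oLoop_spec]
  have hcond : (alp ∉ nt ∧ ∃ o ∈ PySem.List.pyRange 0 (goods.length : Int) 1, o ≠ (jn : Int) ∧
        PySem.Str.find (PySem.List.pyGetD goods o "") alp ≠ -1)
      ↔ (alp ∉ nt ∧ ∃ o < goods.length, o ≠ jn ∧ alp.toList <:+: gAt goods o) := by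
    apply and_congr_right'
    constructor
    · rintro ⟨o, ho, hoj, hfo⟩
      rw [PySem.List.mem_pyRange_one] at ho
      have hoe : o = ((o.toNat : Nat) : Int) := by omega
      refine ⟨o.toNat, by omega, by omega, ?_⟩
      rw [hoe, PySem.List.pyGetD_natCast] at hfo
      exact (PySem.Str.find_ne_neg_one_iff _ _).1 hfo
    · rintro ⟨o, ho, hoj, hinf⟩
      refine ⟨(o : Int), PySem.List.mem_pyRange_one.2 (by omega), by omega, ?_⟩
      rw [PySem.List.pyGetD_natCast]
      exact (PySem.Str.find_ne_neg_one_iff _ _).2 hinf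
  rw [if_congr hcond rfl rfl]


-- ---------- A: the k-loop ----------

theorem kLoop_foldl (goods : List String) (i j : Int) (ks : List Int)
    (st : List (List String) × List String) :
    solKLoop goods i j ks st =
      (ks.map (fun k => PySem.Str.slice (PySem.List.pyGetD goods j "")
        (some k) (some (k + i)))).foldl (kStep goods j) st := by
  induction ks generalizing st with
  | nil => rfl
  | cons k rest ih =>
    obtain ⟨ans, nt⟩ := st
    simp only [solKLoop, List.map_cons, List.foldl_cons]
    rw [ih]
    rfl


theorem dExt_cons (a : List String) (x : String) (l : List String) :
    dExt a (x :: l) = dExt (if x ∈ a then a else a ++ [x]) l := rfl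

theorem uniqB_false (goods : List String) (jn : Nat) (alp : String)
    (hs : ∃ o < goods.length, o ≠ jn ∧ alp.toList <:+: gAt goods o) :
    uniqB goods jn alp = false := by
  rw [Bool.eq_false_iff]
  intro h
  obtain ⟨o, ho, hne, hinf⟩ := hs
  exact (uniqB_iff goods jn alp).1 h o ho hne hinf

theorem kFold_spec (goods : List String) (jn : Nat) (hj : jn < goods.length)
    (alps : List String) (halps : ∀ alp ∈ alps, alp.toList <:+: gAt goods jn) :
    ∀ (a nt : List String) (ans : List (List String)), jn < ans.length →
    (∀ s ∈ nt, shared2 goods s) →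
    ∃ nt', alps.foldl (kStep goods (jn : Int)) (ans.set jn a, nt)
        = (ans.set jn (dExt a (alps.filter (uniqB goods jn))), nt')
      ∧ ∀ s ∈ nt', shared2 goods s := by
  induction alps with
  | nil =>
    intro a nt ans _ hnt
    exact ⟨nt, rfl, hnt⟩
  | cons alp alps ih =>
    intro a nt ans hlen hnt
    have hinf : alp.toList <:+: gAt goods jn := halps alp List.mem_cons_self
    have ihr := ih (fun x hx => halps x (List.mem_cons_of_mem _ hx))
    rw [List.foldl_cons]
    by_cases hs : ∃ o < goods.length, o ≠ jn ∧ alp.toList <:+: gAt goods o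
    · have hub : uniqB goods jn alp = false := uniqB_false goods jn alp hs
      by_cases hmem : alp ∈ nt
      · have hstep : kStep goods (jn : Int) (ans.set jn a, nt) alp = (ans.set jn a, nt) := by
          have hC : ¬(alp ∉ nt ∧ ∃ o < goods.length, o ≠ jn ∧ alp.toList <:+: gAt goods o) :=
            fun h => h.1 hmem
          simp only [kStep]
          rw [oLoop_range, if_neg hC]
          simp only
          rw [if_neg (fun h => h.2.2 hmem)]
        rw [hstep]
        obtain ⟨nt', heq, hnt'⟩ := ihr a nt ans hlen hnt
        exact ⟨nt', by rw [heq, List.filter_cons_of_neg (by simp [hub])], hnt'⟩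
      · have hstep : kStep goods (jn : Int) (ans.set jn a, nt) alp
            = (ans.set jn a, nt ++ [alp]) := by
          have hC : alp ∉ nt ∧ ∃ o < goods.length, o ≠ jn ∧ alp.toList <:+: gAt goods o :=
            ⟨hmem, hs⟩
          simp only [kStep]
          rw [oLoop_range, if_pos hC]
          simp only
          rw [if_neg (fun h => by exact absurd h.1 (by norm_num))]
        rw [hstep]
        have hnt2 : ∀ s ∈ nt ++ [alp], shared2 goods s := by
          intro s hsmem
          rcases List.mem_append.1 hsmem with h | h
          · exact hnt s h
          · simp at h; subst h
            obtain ⟨o, ho, hne, hio⟩ := hs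
            exact ⟨o, jn, ho, hj, hne, hio, hinf⟩
        obtain ⟨nt', heq, hnt'⟩ := ihr a (nt ++ [alp]) ans hlen hnt2
        exact ⟨nt', by rw [heq, List.filter_cons_of_neg (by simp [hub])], hnt'⟩
    · have hub : uniqB goods jn alp = true := by
        rw [uniqB_iff]
        intro o ho hne hio
        exact hs ⟨o, ho, hne, hio⟩
      have hmem : alp ∉ nt := by
        intro h
        exact hs (shared2_other goods alp (hnt alp h) jn)
      have hget : PySem.List.pyGetD (ans.set jn a) ((jn : Nat) : Int) [] = a :=
        pyGetD_set_self ans jn a [] hlen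
      by_cases ha : alp ∈ a
      · have hstep : kStep goods (jn : Int) (ans.set jn a, nt) alp = (ans.set jn a, nt) := by
          have hC : ¬(alp ∉ nt ∧ ∃ o < goods.length, o ≠ jn ∧ alp.toList <:+: gAt goods o) :=
            fun h => hs h.2
          simp only [kStep]
          rw [oLoop_range, if_neg hC]
          simp only
          rw [if_neg (by rw [hget]; intro h; exact h.2.1 ha)]
        rw [hstep]
        obtain ⟨nt', heq, hnt'⟩ := ihr a nt ans hlen hnt
        refine ⟨nt', ?_, hnt'⟩
        rw [heq, List.filter_cons_of_pos (by simp [hub]), dExt_cons, if_pos ha]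
      · have hstep : kStep goods (jn : Int) (ans.set jn a, nt) alp
            = (ans.set jn (a ++ [alp]), nt) := by
          have hC : ¬(alp ∉ nt ∧ ∃ o < goods.length, o ≠ jn ∧ alp.toList <:+: gAt goods o) :=
            fun h => hs h.2
          simp only [kStep]
          rw [oLoop_range, if_neg hC]
          simp only
          rw [if_pos (by refine ⟨by norm_num, ?_, hmem⟩; rw [hget]; exact ha)]
          rw [hget]
          simp [List.set_set]
        rw [hstep]
        obtain ⟨nt', heq, hnt'⟩ := ihr (a ++ [alp]) nt ans hlen hnt
        refine ⟨nt', ?_, hnt'⟩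
        rw [heq, List.filter_cons_of_pos (by simp [hub]), dExt_cons, if_neg ha]


-- ---------- A: the j-loop ----------

theorem jLoop_spec (goods : List String) (i : Int) (hi : 1 ≤ i) :
    ∀ (js : List Int), (∀ x ∈ js, ∃ jn : Nat, x = (jn : Int) ∧ jn < goods.length) →
    ∀ (ans : List (List String)) (nt : List String), ans.length = goods.length →
    (∀ s ∈ nt, shared2 goods s) →
    ∃ nt', solJLoop goods i js (ans, nt)
        = (js.foldl (fun ans (j : Int) =>
            if PySem.List.pyGetD ans j ([] : List String) = [] then
              ans.set j.toNat (U goods j.toNat i.toNat)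
            else ans) ans, nt')
      ∧ ∀ s ∈ nt', shared2 goods s := by
  intro js hjs
  induction js with
  | nil =>
    intro ans nt _ hnt
    exact ⟨nt, rfl, hnt⟩
  | cons x js ih =>
    intro ans nt hlen hnt
    obtain ⟨jn, rfl, hjn⟩ := hjs x List.mem_cons_self
    have hjs' := fun y hy => hjs y (List.mem_cons_of_mem _ hy)
    have hgj : PySem.List.pyGetD goods ((jn : Nat) : Int) "" = goods.getD jn "" :=
      PySem.List.pyGetD_natCast goods jn ""
    have htoNat : (((jn : Nat) : Int)).toNat = jn := by omega
    rw [List.foldl_cons]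
    by_cases hz : PySem.List.pyGetD ans ((jn : Nat) : Int) ([] : List String) = []
    · have hset : ans.set jn ([] : List String) = ans := by
        apply set_getD_self ans jn [] [] (by omega)
        rw [PySem.List.pyGetD_natCast] at hz
        exact hz
      by_cases hg : PySem.Str.len (PySem.List.pyGetD goods ((jn : Nat) : Int) "") ≥ i
      · -- guard true: run the k-loop
        have hstep : solJLoop goods i ((jn : Nat) :: js : List Int) (ans, nt)
            = solJLoop goods i js (solKLoop goods i (jn : Nat)
                (PySem.List.pyRange 0
                  (PySem.Str.len (PySem.List.pyGetD goods ((jn : Nat) : Int) "") + 1 - i) 1)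
                (ans, nt)) := by
          simp only [solJLoop]
          rw [if_pos ⟨hz, hg⟩]
        have hi' : ((i.toNat : Nat) : Int) = i := by omega
        have hmap : (PySem.List.pyRange 0
              (PySem.Str.len (PySem.List.pyGetD goods ((jn : Nat) : Int) "") + 1 - i) 1).map
              (fun k => PySem.Str.slice (PySem.List.pyGetD goods ((jn : Nat) : Int) "")
                (some k) (some (k + i)))
            = subsOf (gAt goods jn) i.toNat := by
          rw [hgj]
          conv_lhs => rw [← hi']
          exact sliceMap (goods.getD jn "") i.toNat
        have hkl := kLoop_foldl goods i ((jn : Nat) : Int)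
          (PySem.List.pyRange 0
            (PySem.Str.len (PySem.List.pyGetD goods ((jn : Nat) : Int) "") + 1 - i) 1) (ans, nt)
        rw [hmap] at hkl
        have halps : ∀ alp ∈ subsOf (gAt goods jn) i.toNat, alp.toList <:+: gAt goods jn :=
          fun alp h => ((mem_subsOf (gAt goods jn) i.toNat (by omega) alp).1 h).2
        obtain ⟨nt1, heq, hnt1⟩ := kFold_spec goods jn hjn (subsOf (gAt goods jn) i.toNat)
          halps [] nt ans (by omega) hnt
        rw [hset] at heq
        rw [hstep, hkl, heq]
        obtain ⟨nt', heq2, hnt'⟩ := ih hjs' (ans.set jn (dExt []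
          ((subsOf (gAt goods jn) i.toNat).filter (uniqB goods jn)))) nt1 (by simp [hlen]) hnt1
        refine ⟨nt', ?_, hnt'⟩
        rw [heq2]
        rw [if_pos hz, htoNat]
        rfl
      · -- guard false but answer[jn] = []: U is empty, both sides unchanged
        have hstep : solJLoop goods i ((jn : Nat) :: js : List Int) (ans, nt)
            = solJLoop goods i js (ans, nt) := by
          simp only [solJLoop]
          rw [if_neg (fun h => hg h.2)]
        have hU : U goods jn i.toNat = [] := by
          have hlt : (gAt goods jn).length < i.toNat := by
            rw [hgj] at hg
            rw [PySem.Str.len_eq] at hg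
            unfold gAt
            omega
          unfold U subsOf
          have : (gAt goods jn).length + 1 - i.toNat = 0 := by omega
          rw [this]
          rfl
        have hfold : (if PySem.List.pyGetD ans ((jn : Nat) : Int) ([] : List String) = [] then
              ans.set (((jn : Nat) : Int)).toNat (U goods (((jn : Nat) : Int)).toNat i.toNat)
            else ans) = ans := by
          rw [if_pos hz, htoNat, hU, hset]
        rw [hstep, hfold]
        exact ih hjs' ans nt hlen hnt
    · have hstep : solJLoop goods i ((jn : Nat) :: js : List Int) (ans, nt)
          = solJLoop goods i js (ans, nt) := by
        simp only [solJLoop]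
        rw [if_neg (fun h => hz h.1)]
      rw [hstep, if_neg hz]
      exact ih hjs' ans nt hlen hnt


theorem passA (goods : List String) (i : Nat) (g : Nat → List String) (N : Nat) :
    ∀ (m : Nat), m ≤ N →
    (PySem.List.pyRange 0 (m : Int) 1).foldl (fun ans (j : Int) =>
        if PySem.List.pyGetD ans j ([] : List String) = [] then
          ans.set j.toNat (U goods j.toNat i)
        else ans) ((List.range N).map g)
      = (List.range N).map (fun j => if j < m ∧ g j = [] then U goods j i else g j) := by
  intro m hm
  induction m with
  | zero =>
    rw [show ((0 : Nat) : Int) = 0 from rfl, PySem.List.pyRange_one_eq_nil (by omega)]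
    simp
  | succ m ih =>
    have hm' : m ≤ N := by omega
    have hcast : ((m + 1 : Nat) : Int) = (m : Int) + 1 := by push_cast; ring
    rw [hcast, PySem.List.pyRange_one_succ_right (by omega), List.foldl_append, ih hm']
    simp only [List.foldl_cons, List.foldl_nil]
    have hget : PySem.List.pyGetD ((List.range N).map
          (fun j => if j < m ∧ g j = [] then U goods j i else g j)) ((m : Nat) : Int) []
        = (if m < m ∧ g m = [] then U goods m i else g m) :=
      pyGetDMap _ N m [] (by omega)
    have hgm : (if m < m ∧ g m = [] then U goods m i else g m) = g m := by
      rw [if_neg (by omega)]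
    rw [hget, hgm]
    by_cases hz : g m = []
    · rw [if_pos hz]
      rw [show (((m : Nat) : Int)).toNat = m from by omega]
      rw [setMap _ N m _ (by omega)]
      apply List.map_congr_left
      intro j hj
      simp only [List.mem_range] at hj
      rcases eq_or_ne j m with rfl | hne
      · simp [hz]
      · simp only [if_neg hne]
        by_cases h1 : j < m ∧ g j = []
        · rw [if_pos h1, if_pos ⟨by omega, h1.2⟩]
        · rw [if_neg h1, if_neg (by rintro ⟨h2, h3⟩; exact h1 ⟨by omega, h3⟩)]
    · rw [if_neg (fun h => hz h)]
      apply List.map_congr_left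
      intro j hj
      simp only [List.mem_range] at hj
      by_cases h1 : j < m ∧ g j = []
      · rw [if_pos h1, if_pos ⟨by omega, h1.2⟩]
      · rw [if_neg h1, if_neg (by
          rintro ⟨h2, h3⟩
          rcases eq_or_ne j m with rfl | hne
          · exact hz h3
          · exact h1 ⟨by omega, h3⟩)]


-- ---------- A: the i-loop ----------

theorem iLoop_append (goods : List String) (l1 l2 : List Int) (ans : List (List String)) :
    solILoop goods (l1 ++ l2) ans = solILoop goods l2 (solILoop goods l1 ans) := by
  induction l1 generalizing ans with
  | nil => rfl
  | cons x l1 ih => simp only [List.cons_append, solILoop]; exact ih _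


theorem iLoop_spec (goods : List String) (m : Nat) :
    solILoop goods (PySem.List.pyRange 1 ((m : Int) + 1) 1)
        ((PySem.List.pyRange 0 (goods.length : Int) 1).map (fun _ => ([] : List String)))
      = (List.range goods.length).map (fun j => firstU goods j m) := by
  induction m with
  | zero =>
    rw [show ((0 : Nat) : Int) + 1 = 1 from rfl, PySem.List.pyRange_one_eq_nil (by omega)]
    show (PySem.List.pyRange 0 (goods.length : Int) 1).map (fun _ => ([] : List String))
      = (List.range goods.length).map fun j => firstU goods j 0
    apply List.ext_getElem
    · simp [PySem.List.length_pyRange_one]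
    · intro k h1 h2
      simp [firstU]
  | succ m ih =>
    have hcast : ((m + 1 : Nat) : Int) + 1 = ((m : Int) + 1) + 1 := by push_cast; ring
    rw [hcast, PySem.List.pyRange_one_succ_right (by omega), iLoop_append, ih]
    show (solJLoop goods ((m : Int) + 1) (PySem.List.pyRange 0 (goods.length : Int) 1)
      ((List.range goods.length).map (fun j => firstU goods j m), [])).1 = _
    have hjs : ∀ x ∈ PySem.List.pyRange 0 (goods.length : Int) 1,
        ∃ jn : Nat, x = (jn : Int) ∧ jn < goods.length := by
      intro x hx
      rw [PySem.List.mem_pyRange_one] at hx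
      exact ⟨x.toNat, by omega, by omega⟩
    obtain ⟨nt', heq, _⟩ := jLoop_spec goods ((m : Int) + 1) (by omega)
      (PySem.List.pyRange 0 (goods.length : Int) 1) hjs
      ((List.range goods.length).map (fun j => firstU goods j m)) [] (by simp)
      (by intro s h; cases h)
    rw [heq]
    simp only
    have hnat : (((m : Int)) + 1).toNat = m + 1 := by omega
    simp only [hnat]
    rw [show ((goods.length : Int)) = ((goods.length : Nat) : Int) from rfl]
    rw [passA goods (m + 1) (fun j => firstU goods j m) goods.length goods.length le_rfl]
    apply List.map_congr_left
    intro j hj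
    simp only [List.mem_range] at hj
    show _ = firstU goods j (m + 1)
    rw [show firstU goods j (m + 1)
      = if firstU goods j m = [] then U goods j (m+1) else firstU goods j m from rfl]
    by_cases hz : firstU goods j m = []
    · rw [if_pos ⟨hj, hz⟩, if_pos hz]
    · rw [if_neg (by rintro ⟨_, h⟩; exact hz h), if_neg hz]


-- ---------- B: the owner dictionary ----------

theorem f1_idem (j : Int) (o : Option Int) : f1 j (f1 j o) = f1 j o := by
  rcases o with _ | v
  · simp [f1]
  · by_cases h : v = j
    · simp [f1, h]
    · simp [f1, h]; intro h2; omega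

-- one step of Source B's inner loop ('if owner.setdefault(s, j) != j: owner[s] = -1')
theorem ownerStepGet (j : Int) (d : PySem.Dict String Int) (s' s : String) :
    (let v := (d.get? s').getD j
     let d' := d.setdefault s' j
     if v ≠ j then d'.insert s' (-1) else d').get? s
      = if s = s' then f1 j (d.get? s) else d.get? s := by
  by_cases hss : s = s'
  · subst hss
    rcases hd : d.get? s with _ | w
    · simp only [hd, Option.getD_none]
      rw [if_neg (by simp), PySem.Dict.get?_setdefault_self, hd]
      rfl
    · simp only [hd, Option.getD_some]
      by_cases hw : w = j
      · rw [if_neg (by simp [hw]), PySem.Dict.get?_setdefault_self, hd]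
        simp [f1, hw]
      · rw [if_pos hw, PySem.Dict.get?_insert_self]
        simp [f1, hw]
  · rw [if_neg hss]
    simp only
    split
    · exact (PySem.Dict.get?_insert_of_ne _ _ hss).trans
        (PySem.Dict.get?_setdefault_of_ne _ _ hss)
    · exact PySem.Dict.get?_setdefault_of_ne _ _ hss

-- Source B's inner-loop body as a named step function (definitionally the port's lambda)
def ownStep (g : String) (i j : Int) (d : PySem.Dict String Int) (k : Int) :
    PySem.Dict String Int :=
  let s := PySem.Str.slice g (some k) (some (k + i))
  let v := (d.get? s).getD j
  let d := d.setdefault s j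
  if v ≠ j then d.insert s (-1) else d

theorem ownStep_get? (g : String) (i j : Int) (d : PySem.Dict String Int) (k : Int)
    (s : String) :
    (ownStep g i j d k).get? s
      = if s = PySem.Str.slice g (some k) (some (k + i)) then f1 j (d.get? s)
        else d.get? s :=
  ownerStepGet j d (PySem.Str.slice g (some k) (some (k + i))) s

theorem ownerFoldGet (g : String) (i : Int) (j : Int) (ks : List Int) :
    ∀ (d : PySem.Dict String Int) (s : String),
    (ks.foldl (ownStep g i j) d).get? s
      = if s ∈ ks.map (fun k => PySem.Str.slice g (some k) (some (k + i))) then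
          f1 j (d.get? s)
        else d.get? s := by
  induction ks with
  | nil => intro d s; simp
  | cons k ks ih =>
    intro d s
    rw [List.foldl_cons, ih, ownStep_get?]
    by_cases h1 : s ∈ ks.map (fun k => PySem.Str.slice g (some k) (some (k + i))) <;>
      by_cases h2 : s = PySem.Str.slice g (some k) (some (k + i)) <;>
        simp [h1, h2, f1_idem]

theorem nodup_keys_setdefault {ν : Type} (d : PySem.Dict String ν) (k : String) (v : ν)
    (h : d.keys.Nodup) : (d.setdefault k v).keys.Nodup := by
  rw [PySem.Dict.keys_setdefault]
  split
  · exact h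
  · next hc =>
    rw [List.nodup_append]
    refine ⟨h, by simp, ?_⟩
    intro a ha b hb
    simp only [List.mem_singleton] at hb
    subst hb
    rw [PySem.Dict.contains_eq_decide_mem_keys] at hc
    intro hab; subst hab
    have hk : a ∉ d.keys := by simpa using hc
    exact hk ha

theorem ownerStr_get? (i : Nat) (hi : 1 ≤ i) (g : String) (j : Int)
    (d : PySem.Dict String Int) (s : String) :
    (altOwnerStr (i : Int) j g d).get? s
      = if s ∈ subsOf g.toList i then f1 j (d.get? s) else d.get? s := by
  unfold altOwnerStr
  have hb : PySem.Str.len g - (i : Int) + 1 = PySem.Str.len g + 1 - (i : Int) := by ring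
  rw [hb]
  show ((PySem.List.pyRange 0 (PySem.Str.len g + 1 - (i : Int)) 1).foldl
      (ownStep g (i : Int) j) d).get? s = _
  rw [ownerFoldGet, sliceMap g i]


theorem ownerStr_nodup (i j : Int) (g : String) (d : PySem.Dict String Int)
    (h : d.keys.Nodup) : (altOwnerStr i j g d).keys.Nodup := by
  unfold altOwnerStr
  generalize PySem.List.pyRange 0 (PySem.Str.len g - i + 1) 1 = ks
  induction ks generalizing d with
  | nil => exact h
  | cons k ks ih =>
    rw [List.foldl_cons]
    apply ih
    simp only
    split
    · exact PySem.Dict.nodup_keys_insert _ _ _ (nodup_keys_setdefault _ _ _ h)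
    · exact nodup_keys_setdefault _ _ _ h


theorem owner_get? (goods : List String) (i : Nat) (hi : 1 ≤ i) (s : String) :
    (altOwner goods (i : Int)).get? s = ownerVal goods i s goods.length := by
  unfold altOwner
  rw [PySem.List.enumerate_eq_map_pyRange goods "", List.foldl_map, PySem.List.len_eq]
  suffices h : ∀ (m : Nat), m ≤ goods.length →
      ((PySem.List.pyRange 0 (m : Int) 1).foldl
        (fun d (p : Int) => altOwnerStr (i : Int) p (PySem.List.pyGetD goods p "") d)
        PySem.Dict.empty).get? s = ownerVal goods i s m by
    exact h goods.length le_rfl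
  intro m hm
  induction m with
  | zero =>
    rw [show ((0 : Nat) : Int) = 0 from rfl, PySem.List.pyRange_one_eq_nil (by omega)]
    simp [ownerVal, occursIn]
  | succ m ih =>
    have hcast : ((m + 1 : Nat) : Int) = (m : Int) + 1 := by push_cast; ring
    rw [hcast, PySem.List.pyRange_one_succ_right (by omega), List.foldl_append]
    simp only [List.foldl_cons, List.foldl_nil]
    rw [ownerStr_get? i hi _ ((m : Nat) : Int) _ s, ih (by omega)]
    have hocc : occursIn goods i s (m + 1)
        = occursIn goods i s m ++ (if s ∈ subsOf (gAt goods m) i then [m] else []) := by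
      unfold occursIn
      rw [List.range_succ, List.filter_append]
      congr 1
      by_cases h : s ∈ subsOf (gAt goods m) i <;> simp [h]
    have hgm : (PySem.List.pyGetD goods ((m : Nat) : Int) "").toList = gAt goods m := by
      rw [PySem.List.pyGetD_natCast]; rfl
    rw [hgm]
    by_cases hmem : s ∈ subsOf (gAt goods m) i
    · rw [if_pos hmem]
      unfold ownerVal
      rw [hocc, if_pos hmem]
      rcases hcc : occursIn goods i s m with _ | ⟨p, _ | ⟨q, r⟩⟩
      · simp [f1]
      · have hpm : p < m := by
          have : p ∈ occursIn goods i s m := by rw [hcc]; exact List.mem_cons_self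
          unfold occursIn at this
          simp only [List.mem_filter, List.mem_range] at this
          exact this.1
        simp only [List.cons_append, List.nil_append, f1]
        rw [if_neg (by intro h; omega)]
      · simp only [List.cons_append, f1]
        rw [if_neg (by intro h; have : (m : Int) = -1 := h.symm; omega)]
    · rw [if_neg hmem]
      unfold ownerVal
      rw [hocc, if_neg hmem, List.append_nil]


theorem owner_nodup (goods : List String) (i : Int) : (altOwner goods i).keys.Nodup := by
  unfold altOwner
  generalize PySem.List.enumerate goods = ps
  have h0 : (PySem.Dict.empty : PySem.Dict String Int).keys.Nodup := by
    rw [PySem.Dict.keys_empty]; exact List.nodup_nil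
  generalize hd : (PySem.Dict.empty : PySem.Dict String Int) = d at h0 ⊢
  clear hd
  induction ps generalizing d with
  | nil => exact h0
  | cons p ps ih =>
    rw [List.foldl_cons]
    exact ih _ (ownerStr_nodup _ _ _ _ h0)


theorem mem_uniqList (goods : List String) (i : Nat) (hi : 1 ≤ i) (jn : Nat)
    (hj : jn < goods.length) (s : String) :
    (s ∈ ((altOwner goods (i : Int)).items.filter
        (fun p => p.2 == (jn : Int))).map (·.1)) ↔ s ∈ U goods jn i := by
  have hnd := owner_nodup goods (i : Int)
  have h1 : (s ∈ ((altOwner goods (i : Int)).items.filter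
        (fun p => p.2 == (jn : Int))).map (·.1))
      ↔ (s, (jn : Int)) ∈ (altOwner goods (i : Int)).items := by
    constructor
    · intro h
      obtain ⟨⟨s', v⟩, hmem, rfl⟩ := List.mem_map.1 h
      obtain ⟨hit, hv⟩ := List.mem_filter.1 hmem
      have : v = (jn : Int) := by simpa using hv
      subst this
      exact hit
    · intro h
      exact List.mem_map.2 ⟨(s, (jn : Int)), List.mem_filter.2 ⟨h, by simp⟩, rfl⟩
  rw [h1, ← PySem.Dict.get?_eq_some_iff_mem_items _ _ _ hnd, owner_get? goods i hi s]
  have h2 : ownerVal goods i s goods.length = some ((jn : Int))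
      ↔ occursIn goods i s goods.length = [jn] := by
    unfold ownerVal
    rcases hcc : occursIn goods i s goods.length with _ | ⟨p, _ | ⟨q, r⟩⟩
    · simp
    · constructor
      · intro h
        have : p = jn := by simp at h; omega
        rw [this]
      · intro h
        have : p = jn := by injection h
        rw [this]
    · constructor
      · intro h
        exfalso
        have : (-1 : Int) = (jn : Int) := by injection h
        omega
      · intro h
        injection h with h1 h2
        simp at h2
    all_goals simp
  rw [h2]
  unfold occursIn
  rw [filter_range_eq_singleton_iff]
  have hUmem : s ∈ U goods jn i
      ↔ s ∈ subsOf (gAt goods jn) i ∧ uniqB goods jn s = true := by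
    unfold U
    rw [mem_dExt]
    simp [List.mem_filter, and_comm]
  rw [hUmem, uniqB_iff]
  constructor
  · rintro ⟨_, hmem, hothers⟩
    have hmem' : s ∈ subsOf (gAt goods jn) i := by simpa using hmem
    have hlen := ((mem_subsOf _ i hi s).1 hmem').1
    refine ⟨hmem', fun o ho hne hinf => ?_⟩
    have hmo : s ∈ subsOf (gAt goods o) i := (mem_subsOf _ i hi s).2 ⟨hlen, hinf⟩
    have hno : s ∉ subsOf (gAt goods o) i := by simpa using hothers o ho hne
    exact hno hmo
  · rintro ⟨hmem, huniq⟩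
    refine ⟨hj, by simpa using hmem, fun o ho hne => ?_⟩
    simp only [decide_eq_false_iff_not]
    intro hmo
    exact huniq o ho hne ((mem_subsOf _ i hi s).1 hmo).2


theorem nodup_uniqList (goods : List String) (i : Int) (j : Int) :
    (((altOwner goods i).items.filter (fun p => p.2 == j)).map (·.1)).Nodup := by
  have hnd := owner_nodup goods i
  have hkeys : (altOwner goods i).keys = (altOwner goods i).items.map (·.1) := rfl
  rw [hkeys] at hnd
  have hsub : ((altOwner goods i).items.filter (fun p => p.2 == j)).Sublist
      (altOwner goods i).items := List.filter_sublist
  exact (hsub.map (·.1)).nodup hnd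


theorem sorted_uniqList (goods : List String) (i : Nat) (hi : 1 ≤ i) (jn : Nat)
    (hj : jn < goods.length) :
    PySem.List.sorted (((altOwner goods (i : Int)).items.filter
        (fun p => p.2 == (jn : Int))).map (·.1)) (fun x => x) false
      = PySem.List.sorted (U goods jn i) (fun x => x) false := by
  apply PySem.List.sorted_eq_sorted_of_perm _ _ _ Function.injective_id
  have hU : (U goods jn i).Nodup := nodup_dExt [] _ List.nodup_nil
  rw [List.perm_ext_iff_of_nodup (nodup_uniqList goods (i : Int) (jn : Int)) hU]
  intro s
  exact mem_uniqList goods i hi jn hj s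


-- ---------- B: the assignment pass ----------

theorem altAssign_foldl (owner : PySem.Dict String Int) (js : List Int)
    (res : List (Option String)) :
    altAssign owner js res = js.foldl (fun res (j : Int) =>
      if PySem.List.pyGetD res j none = none then
        let uniq := PySem.List.sorted ((owner.items.filter (fun p => p.2 == j)).map (·.1))
          (fun x => x) false
        if uniq ≠ [] then res.set j.toNat (some (PySem.Str.join " " uniq)) else res
      else res) res := by
  induction js generalizing res with
  | nil => rfl
  | cons j js ih =>
    rw [List.foldl_cons]
    show altAssign owner js _ = _
    rw [ih]


theorem passB (owner : PySem.Dict String Int) (g : Nat → Option String) (N : Nat) :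
    ∀ (m : Nat), m ≤ N →
    (PySem.List.pyRange 0 (m : Int) 1).foldl (fun res (j : Int) =>
      if PySem.List.pyGetD res j none = none then
        let uniq := PySem.List.sorted ((owner.items.filter (fun p => p.2 == j)).map (·.1))
          (fun x => x) false
        if uniq ≠ [] then res.set j.toNat (some (PySem.Str.join " " uniq)) else res
      else res) ((List.range N).map g)
      = (List.range N).map (fun j => if j < m ∧ g j = none then bVal owner (j : Int) else g j) := by
  intro m hm
  induction m with
  | zero =>
    rw [show ((0 : Nat) : Int) = 0 from rfl, PySem.List.pyRange_one_eq_nil (by omega)]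
    simp
  | succ m ih =>
    have hm' : m ≤ N := by omega
    have hcast : ((m + 1 : Nat) : Int) = (m : Int) + 1 := by push_cast; ring
    rw [hcast, PySem.List.pyRange_one_succ_right (by omega), List.foldl_append, ih hm']
    simp only [List.foldl_cons, List.foldl_nil]
    have hget : PySem.List.pyGetD ((List.range N).map
          (fun j => if j < m ∧ g j = none then bVal owner (j : Int) else g j)) ((m : Nat) : Int) none
        = (if m < m ∧ g m = none then bVal owner (m : Int) else g m) :=
      pyGetDMap _ N m none (by omega)
    have hgm : (if m < m ∧ g m = none then bVal owner (m : Int) else g m) = g m := by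
      rw [if_neg (by omega)]
    rw [hget, hgm]
    by_cases hz : g m = none
    · rw [if_pos hz]
      have hnat : (((m : Nat) : Int)).toNat = m := by omega
      by_cases hu : PySem.List.sorted ((owner.items.filter
          (fun p => p.2 == ((m : Nat) : Int))).map (·.1)) (fun x => x) false ≠ []
      · rw [if_pos hu, hnat, setMap _ N m _ (by omega)]
        apply List.map_congr_left
        intro j hj
        simp only [List.mem_range] at hj
        rcases eq_or_ne j m with rfl | hne
        · rw [if_pos rfl, if_pos (show j < j + 1 ∧ g j = none from ⟨by omega, hz⟩)]
          unfold bVal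
          rw [if_pos hu]
        · rw [if_neg hne]
          by_cases h1 : j < m ∧ g j = none
          · rw [if_pos h1, if_pos ⟨by omega, h1.2⟩]
          · rw [if_neg h1, if_neg (by
              rintro ⟨h2, h3⟩
              exact h1 ⟨by omega, h3⟩)]
      · rw [if_neg hu]
        apply List.map_congr_left
        intro j hj
        simp only [List.mem_range] at hj
        rcases eq_or_ne j m with rfl | hne
        · rw [if_neg (show ¬(j < j ∧ g j = none) from fun h => absurd h.1 (lt_irrefl j)),
            if_pos (show j < j + 1 ∧ g j = none from ⟨by omega, hz⟩)]
          unfold bVal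
          rw [if_neg hu, hz]
        · by_cases h1 : j < m ∧ g j = none
          · rw [if_pos h1, if_pos ⟨by omega, h1.2⟩]
          · rw [if_neg h1, if_neg (by
              rintro ⟨h2, h3⟩
              exact h1 ⟨by omega, h3⟩)]
    · rw [if_neg (fun h => hz h)]
      apply List.map_congr_left
      intro j hj
      simp only [List.mem_range] at hj
      by_cases h1 : j < m ∧ g j = none
      · rw [if_pos h1, if_pos ⟨by omega, h1.2⟩]
      · rw [if_neg h1, if_neg (by
          rintro ⟨h2, h3⟩
          rcases eq_or_ne j m with rfl | hne
          · exact hz h3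
          · exact h1 ⟨by omega, h3⟩)]


theorem bVal_eq (goods : List String) (i : Nat) (hi : 1 ≤ i) (jn : Nat)
    (hj : jn < goods.length) :
    bVal (altOwner goods (i : Int)) (jn : Int)
      = if U goods jn i = [] then none
        else some (PySem.Str.join " "
          (PySem.List.sorted (U goods jn i) (fun x => x) false)) := by
  unfold bVal
  rw [sorted_uniqList goods i hi jn hj]
  by_cases h : U goods jn i = []
  · rw [if_pos h, if_neg (not_not_intro (by rw [h]; rfl))]
  · rw [if_neg h, if_pos (by
      intro hs
      exact h ((PySem.List.sorted_eq_nil_iff _ _ _).1 hs))]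


theorem bLoop_spec (goods : List String) (m : Nat) :
    (PySem.List.pyRange 1 ((m : Int) + 1) 1).foldl (fun res i =>
        altAssign (altOwner goods i) (PySem.List.pyRange 0 (goods.length : Int) 1) res)
      ((PySem.List.pyRange 0 (goods.length : Int) 1).map (fun _ => (none : Option String)))
      = (List.range goods.length).map (fun j => optA goods j m) := by
  induction m with
  | zero =>
    rw [show ((0 : Nat) : Int) + 1 = 1 from rfl,
      PySem.List.pyRange_one_eq_nil (le_refl (1 : Int)), List.foldl_nil]
    apply List.ext_getElem
    · simp [PySem.List.length_pyRange_one]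
    · intro k h1 h2
      simp [optA, firstU]
  | succ m ih =>
    have hcast : ((m + 1 : Nat) : Int) + 1 = ((m : Int) + 1) + 1 := by push_cast; ring
    rw [hcast, PySem.List.pyRange_one_succ_right (by omega), List.foldl_append, ih]
    simp only [List.foldl_cons, List.foldl_nil]
    rw [altAssign_foldl]
    rw [show ((goods.length : Int)) = ((goods.length : Nat) : Int) from rfl]
    rw [passB (altOwner goods ((m : Int) + 1)) (fun j => optA goods j m)
      goods.length goods.length le_rfl]
    apply List.map_congr_left
    intro j hj
    simp only [List.mem_range] at hj
    have hio : ((m : Int) + 1) = (((m + 1 : Nat)) : Int) := by push_cast; ring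
    show _ = optA goods j (m + 1)
    by_cases hz : firstU goods j m = []
    · have hzn : optA goods j m = none := by simp [optA, hz]
      rw [if_pos ⟨hj, hzn⟩, hio, bVal_eq goods (m + 1) (by omega) j hj]
      have hfu : firstU goods j (m + 1) = U goods j (m + 1) := by
        show (if firstU goods j m = [] then U goods j (m+1) else firstU goods j m) = _
        rw [if_pos hz]
      by_cases hU : U goods j (m + 1) = []
      · rw [if_pos hU]
        simp [optA, hfu, hU]
      · rw [if_neg hU]
        simp [optA, hfu, hU]
    · have hzn : optA goods j m ≠ none := by simp [optA, hz]
      rw [if_neg (by rintro ⟨_, h⟩; exact hzn h)]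
      have hfu : firstU goods j (m + 1) = firstU goods j m := by
        show (if firstU goods j m = [] then U goods j (m+1) else firstU goods j m) = _
        rw [if_neg hz]
      simp [optA, hfu]


-- ---------- the two max computations ----------

theorem maxFold_some (f : Option Int → Int → Option Int)
    (hf : ∀ m x, f (some m) x = some (max m x)) (xs : List Int) (m : Int) :
    xs.foldl f (some m) = some (xs.foldl (fun (a : Int) x => max a x) m) := by
  induction xs generalizing m with
  | nil => rfl
  | cons x xs ih => rw [List.foldl_cons, hf, ih, List.foldl_cons]


theorem maxLen_eq (goods : List String) :
    PySem.List.maxD (goods.map PySem.Str.len) (fun x => x) 0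
      = goods.foldl (fun m g => max m (PySem.Str.len g)) 0 := by
  cases goods with
  | nil => rfl
  | cons g gs =>
    show (PySem.List.max? (List.map PySem.Str.len (g :: gs)) fun x => x).getD 0 = _
    unfold PySem.List.max?
    simp only [List.map_cons, List.foldl_cons]
    rw [maxFold_some _ (fun m x => by
      show (if m < x then some x else some m) = some (max m x)
      split_ifs with h
      · rw [max_eq_right h.le]
      · rw [max_eq_left (by omega)])]
    rw [Option.getD_some]
    have h0 : max 0 (PySem.Str.len g) = PySem.Str.len g := by
      rw [max_eq_right]
      rw [PySem.Str.len_eq]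
      exact Int.natCast_nonneg _
    rw [h0, List.foldl_map]



theorem foldlMax_nonneg (goods : List String) :
    ∀ c : Int, 0 ≤ c → 0 ≤ goods.foldl (fun m g => max m (PySem.Str.len g)) c := by
  induction goods with
  | nil => exact fun c hc => hc
  | cons g gs ih =>
    intro c hc
    rw [List.foldl_cons]
    exact ih _ (le_trans hc (le_max_left _ _))

-- ===== VERDICT (by name: the statement is the Claim_ definition above) =====
theorem solution_spec : Claim_equal_solution := by
  intro goods _
  show solution goods = solution_alt goods
  simp only [solution, solution_alt]
  rw [maxLen_eq]
  have hnn : 0 ≤ goods.foldl (fun m g => max m (PySem.Str.len g)) 0 :=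
    foldlMax_nonneg goods 0 le_rfl
  set Mi := goods.foldl (fun m g => max m (PySem.Str.len g)) 0 with hMi
  have hM : Mi = ((Mi.toNat : Nat) : Int) := by omega
  rw [hM, iLoop_spec goods Mi.toNat, bLoop_spec goods Mi.toNat]
  rw [List.map_map, List.map_map]
  apply List.map_congr_left
  intro j hj
  simp only [Function.comp]
  by_cases hz : firstU goods j Mi.toNat = []
  · simp [optA, hz, PySem.List.sorted_eq_nil_iff]
  · simp [optA, hz, PySem.List.sorted_eq_nil_iff]
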